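-- pv_equiv track=rewrite | github.com/saltudelft/libsa4py | libsa4py/cst_visitor.py | __find_args_vars_use
-- ===== SOURCE A (Python) =====
-- from typing import List, Dict, Tuple, Union, Optional
--
-- def __find_args_vars_use(vars_name: list, may_vars_use: List[list], is_var_arg: bool=False) -> dict:
--     """
--     Finds usage of variables or functions' arguments in a context
--     """
--
--     # def is_var_def(a: str, mu: list):
--     #     if is_var_arg:
--     #         return False
--     #     else:
--     #         # TODO: Do not exclude non-assign statements like x+= smt
--     #         return a in mu[0] or ('self' in mu[0] and a in mu[1])
--
--     fn_args_use = {}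
--     for arg in vars_name:
--         arg_use = []
--         for may_use in may_vars_use:
--             if arg in may_use and len(may_use) > 1:
--                 # Excludes variable definition itself from the context hints
--                 arg_use.append(may_use)
--         fn_args_use[arg] = arg_use
--
--     return fn_args_use
-- ===== SOURCE B (Python) =====
-- def __find_args_vars_use(vars_name: list, may_vars_use, is_var_arg: bool = False) -> dict:
--     """Inverted index: one pass over may_vars_use, then per-arg lookup."""
--     index = {}
--     for may_use in may_vars_use:
--         if len(may_use) > 1:
--             for v in dict.fromkeys(may_use):
--                 index.setdefault(v, []).append(may_use)
--     return {arg: index.get(arg, []) for arg in vars_name}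
-- ===== Notes on version B (the rewrite author's own statement) =====
-- stated objective: faster
-- what changed: Replaced A's per-variable scan of all contexts (nested loops) by a single pass building an inverted index from element to its contexts (len>1), followed by one dict lookup per variable name.
import Mathlib
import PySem

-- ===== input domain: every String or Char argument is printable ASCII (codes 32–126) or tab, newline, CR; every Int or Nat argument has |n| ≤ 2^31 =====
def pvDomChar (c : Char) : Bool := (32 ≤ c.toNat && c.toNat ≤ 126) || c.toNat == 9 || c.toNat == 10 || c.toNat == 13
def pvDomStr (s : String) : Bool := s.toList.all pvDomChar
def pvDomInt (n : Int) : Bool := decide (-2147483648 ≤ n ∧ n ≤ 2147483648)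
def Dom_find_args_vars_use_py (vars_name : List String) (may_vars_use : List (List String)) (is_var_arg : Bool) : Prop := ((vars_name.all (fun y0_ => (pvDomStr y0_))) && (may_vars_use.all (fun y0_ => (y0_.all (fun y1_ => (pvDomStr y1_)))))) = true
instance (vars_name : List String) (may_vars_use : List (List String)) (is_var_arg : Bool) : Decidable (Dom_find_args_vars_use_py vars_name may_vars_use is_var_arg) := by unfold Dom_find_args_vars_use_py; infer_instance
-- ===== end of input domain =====

-- ===== PORT A =====
-- B replaces A's per-arg scan of may_vars_use by a one-pass inverted index (element -> list of its may_uses), then a lookup per arg. Objective: faster (asymptotic).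
def find_args_vars_use_py (vars_name : List String) (may_vars_use : List (List String)) (is_var_arg : Bool) : List (String × List (List String)) :=
  (vars_name.foldl (fun d arg =>
      d.insert arg (may_vars_use.foldl (fun arg_use may_use =>
        if arg ∈ may_use ∧ may_use.length > 1 then arg_use ++ [may_use] else arg_use) []))
    PySem.Dict.empty).items

-- ===== PORT B =====
def find_args_vars_use_py_alt (vars_name : List String) (may_vars_use : List (List String)) (is_var_arg : Bool) : List (String × List (List String)) :=
  let index : PySem.Dict String (List (List String)) :=
    may_vars_use.foldl (fun idx may_use =>
      if may_use.length > 1 then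
        (PySem.List.dedup may_use).foldl (fun idx v => idx.modify v [] (· ++ [may_use])) idx
      else idx) PySem.Dict.empty
  (vars_name.foldl (fun out arg => out.insert arg (index.getD arg [])) PySem.Dict.empty).items

-- ===== PRECONDITION & SPEC =====
def Spec_find_args_vars_use_py (vars_name : List String) (may_vars_use : List (List String)) (is_var_arg : Bool) (out : List (String × List (List String))) : Prop := out = find_args_vars_use_py_alt vars_name may_vars_use is_var_arg
instance (vars_name : List String) (may_vars_use : List (List String)) (is_var_arg : Bool) (out : List (String × List (List String))) : Decidable (Spec_find_args_vars_use_py vars_name may_vars_use is_var_arg out) := by unfold Spec_find_args_vars_use_py; infer_instance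

-- ===== CLAIM (what is proved, stated in full; the proofs are below) =====
def Claim_equal_find_args_vars_use_py : Prop := ∀ (vars_name : List String) (may_vars_use : List (List String)) (is_var_arg : Bool), Dom_find_args_vars_use_py vars_name may_vars_use is_var_arg → Spec_find_args_vars_use_py vars_name may_vars_use is_var_arg (find_args_vars_use_py vars_name may_vars_use is_var_arg)

-- ===== LEMMAS AND PROOFS =====

-- inner fold of B over a duplicate-free list: arg's entry grows by [mu] iff arg is in the list
lemma getD_foldl_modify_mem (vs : List String) (mu : List String) (hn : vs.Nodup)
    (idx : PySem.Dict String (List (List String))) (arg : String) :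
    ((vs.foldl (fun idx v => idx.modify v [] (· ++ [mu])) idx).getD arg []) =
      if arg ∈ vs then idx.getD arg [] ++ [mu] else idx.getD arg [] := by
  induction vs generalizing idx with
  | nil => simp
  | cons v vs ih =>
    simp only [List.foldl_cons]
    rw [ih (List.Nodup.of_cons hn)]
    by_cases hv : arg = v
    · subst hv
      have : arg ∉ vs := (List.nodup_cons.mp hn).1
      simp [this, PySem.Dict.getD_modify_self]
    · simp [PySem.Dict.getD_modify, hv, List.mem_cons]

-- the inverted index's entry for arg is exactly A's inner scan result
lemma index_getD (may_vars_use : List (List String)) (arg : String)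
    (idx : PySem.Dict String (List (List String))) :
    ((may_vars_use.foldl (fun idx may_use =>
        if may_use.length > 1 then
          (PySem.List.dedup may_use).foldl (fun idx v => idx.modify v [] (· ++ [may_use])) idx
        else idx) idx).getD arg []) =
      idx.getD arg [] ++ (may_vars_use.filter (fun mu => decide (arg ∈ mu ∧ mu.length > 1))) := by
  induction may_vars_use generalizing idx with
  | nil => simp
  | cons mu mus ih =>
    simp only [List.foldl_cons, List.filter_cons]
    by_cases hl : mu.length > 1
    · rw [if_pos hl, ih]
      rw [getD_foldl_modify_mem _ _ (PySem.List.nodup_dedup mu)]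
      by_cases hm : arg ∈ mu
      · simp [hm, hl]
      · simp [hm, hl]
    · rw [if_neg hl, ih]
      simp [hl]

-- ===== VERDICT (by name: the statement is the Claim_ definition above) =====
theorem find_args_vars_use_py_spec : Claim_equal_find_args_vars_use_py := by
  intro vars_name may_vars_use is_var_arg _
  unfold Spec_find_args_vars_use_py find_args_vars_use_py find_args_vars_use_py_alt
  congr 1
  apply PySem.List.foldl_congr_mem
  intro d arg _
  congr 1
  rw [index_getD, PySem.List.foldl_append_ite_eq_filter]
  simp
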